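-- pv_equiv track=rewrite | github.com/1274866478-stack/data_agent | backend/src/app/services/disambiguation/ambiguity_detector.py | _has_clear_terms
-- ===== SOURCE A (Python) =====
-- from typing import Dict, List, Any, Optional, Set
--
-- def _has_clear_terms(
--
--     query: str,
--     cube_schema: Optional[Dict[str, Any]]
-- ) -> bool:
--     """检查查询是否有明确的术语"""
--     if not cube_schema:
--         # 如果没有 schema，简单检查查询长度
--         return len(query) >= 10
--
--     # 检查是否包含明确的度量或维度名称
--     all_terms = set()
--     for cube_name, cube_def in cube_schema.items():
--         all_terms.update(cube_def.get("measures", []))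
--         all_terms.update(cube_def.get("dimensions", []))
--
--     query_lower = query.lower()
--     for term in all_terms:
--         if term.lower() in query_lower:
--             return True
--
--     return False
-- ===== SOURCE B (Python) =====
-- def _has_clear_terms(query, cube_schema):
--     if not cube_schema:
--         return len(query) >= 10
--     # Build a trie (prefix tree) of all lowered measure/dimension names;
--     # "\0" marks the end of a stored term (input chars are printable, never "\0").
--     mark = "\0"
--     root = {}
--     for cube_def in cube_schema.values():
--         for key in ("measures", "dimensions"):
--             for t in cube_def.get(key, []):
--                 node = root
--                 for ch in t.lower() + mark:
--                     node = node.setdefault(ch, {})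
--     q = query.lower()
--     n = len(q)
--     for i in range(n + 1):
--         node = root
--         if mark in node:
--             return True
--         for j in range(i, n):
--             node = node.get(q[j])
--             if node is None:
--                 break
--             if mark in node:
--                 return True
--     return False
-- ===== Notes on version B (the rewrite author's own statement) =====
-- stated objective: alternative
-- what changed: A de-duplicates all schema terms into a set and tests each term as a substring of the lowered query; B builds a trie (prefix tree) of all lowered terms once and then walks the query through the trie from each start position, so no per-term substring test remains.
import Mathlib
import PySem

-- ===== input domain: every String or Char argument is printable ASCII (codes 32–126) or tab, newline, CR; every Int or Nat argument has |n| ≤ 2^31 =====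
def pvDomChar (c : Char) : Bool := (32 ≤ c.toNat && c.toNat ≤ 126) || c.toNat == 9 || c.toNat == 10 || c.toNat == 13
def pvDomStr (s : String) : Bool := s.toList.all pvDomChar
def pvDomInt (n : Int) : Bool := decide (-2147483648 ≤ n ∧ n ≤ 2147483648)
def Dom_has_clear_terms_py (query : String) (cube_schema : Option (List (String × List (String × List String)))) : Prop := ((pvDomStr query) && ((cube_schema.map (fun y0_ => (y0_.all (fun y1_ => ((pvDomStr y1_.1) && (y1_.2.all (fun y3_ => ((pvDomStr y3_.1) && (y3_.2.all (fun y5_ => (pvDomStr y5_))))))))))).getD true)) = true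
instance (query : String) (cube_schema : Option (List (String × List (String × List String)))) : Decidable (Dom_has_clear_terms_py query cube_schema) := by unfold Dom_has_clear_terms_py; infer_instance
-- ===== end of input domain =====

-- B replaces A's per-term substring loop by a trie (prefix tree) of all lowered terms, walked from
-- each start position of the lowered query; objective: alternative (different data structure).

-- ===== PORT A =====
-- literal transliteration of A: the set-building loop over cube_schema.items(), then the
-- early-return membership loop (order-independent, consumed as `any` over the Set)
def has_clear_terms_py (query : String) (cube_schema : Option (List (String × List (String × List String)))) : Bool :=
  match cube_schema with
  | none => decide (10 ≤ PySem.Str.len query)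
  | some d =>
    if d.isEmpty then decide (10 ≤ PySem.Str.len query)
    else
      let all_terms : PySem.Set String :=
        d.foldl (fun s kv =>
          PySem.Set.update
            (PySem.Set.update s (PySem.Dict.getD (PySem.Dict.mk kv.2) "measures" []))
            (PySem.Dict.getD (PySem.Dict.mk kv.2) "dimensions" [])) PySem.Set.empty
      let query_lower := PySem.Str.lower query
      all_terms.any (fun term => PySem.Str.isIn (PySem.Str.lower term) query_lower)

-- ===== PORT B =====
-- B-side helpers: a first-child/next-sibling trie over Char; `pvMark` (code 0, never a Dom input
-- character) plays the role of Source B's "\0" end-of-term marker key.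
inductive PTrie where
  | nil : PTrie
  | node : Char → PTrie → PTrie → PTrie
deriving DecidableEq, Repr

def pvMark : Char := Char.ofNat 0

-- node = node.setdefault(ch, {}) chain: insert a key path into the trie
def trieInsert : PTrie → List Char → PTrie
  | tr, [] => tr
  | .nil, c :: cs => .node c (trieInsert .nil cs) .nil
  | .node c' ch sib, c :: cs =>
      if c = c' then .node c' (trieInsert ch cs) sib
      else .node c' ch (trieInsert sib (c :: cs))
termination_by tr key => (key.length, sizeOf tr)

-- `mark in node`
def trieHasStop : PTrie → Bool
  | .nil => false
  | .node c _ sib => c = pvMark || trieHasStop sib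

-- `node.get(ch)`
def trieFind : PTrie → Char → Option PTrie
  | .nil, _ => none
  | .node c' ch sib, c => if c = c' then some ch else trieFind sib c

-- Source B's inner walk from one start position: stop-marker check, then step by each char
def trieMatch : PTrie → List Char → Bool
  | tr, [] => trieHasStop tr
  | tr, c :: rest =>
      trieHasStop tr ||
        (match trieFind tr c with
         | none => false
         | some ch => trieMatch ch rest)
termination_by _ s => s.length

-- Source B's outer loop over start positions i = 0 .. len(q)
def trieScan : PTrie → List Char → Bool
  | tr, [] => trieMatch tr []
  | tr, s@(_ :: rest) => trieMatch tr s || trieScan tr rest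
termination_by _ s => s.length

def has_clear_terms_py_alt (query : String) (cube_schema : Option (List (String × List (String × List String)))) : Bool :=
  match cube_schema with
  | none => decide (10 ≤ PySem.Str.len query)
  | some d =>
    if d.isEmpty then decide (10 ≤ PySem.Str.len query)
    else
      let root : PTrie :=
        ((d.map (·.2)).flatMap (fun cube_def =>
          ["measures", "dimensions"].flatMap
            (fun key => PySem.Dict.getD (PySem.Dict.mk cube_def) key []))).foldl
          (fun tr t => trieInsert tr (PySem.Chars.lower t.toList ++ [pvMark])) PTrie.nil
      trieScan root (PySem.Chars.lower query.toList)

-- ===== PRECONDITION & SPEC =====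
def Spec_has_clear_terms_py (query : String) (cube_schema : Option (List (String × List (String × List String)))) (out : Bool) : Prop := out = has_clear_terms_py_alt query cube_schema
instance (query : String) (cube_schema : Option (List (String × List (String × List String)))) (out : Bool) : Decidable (Spec_has_clear_terms_py query cube_schema out) := by unfold Spec_has_clear_terms_py; infer_instance

-- ===== CLAIM (what is proved, stated in full; the proofs are below) =====
def Claim_equal_has_clear_terms_py : Prop := ∀ (query : String) (cube_schema : Option (List (String × List (String × List String)))), Dom_has_clear_terms_py query cube_schema → Spec_has_clear_terms_py query cube_schema (has_clear_terms_py query cube_schema)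

-- ===== LEMMAS AND PROOFS =====

-- membership in A's set-building fold
lemma mem_termfold (d : List (String × List (String × List String))) (s : PySem.Set String) (y : String) :
    y ∈ d.foldl (fun s kv =>
        PySem.Set.update
          (PySem.Set.update s (PySem.Dict.getD (PySem.Dict.mk kv.2) "measures" []))
          (PySem.Dict.getD (PySem.Dict.mk kv.2) "dimensions" [])) s ↔
      y ∈ s ∨ ∃ kv ∈ d, y ∈ PySem.Dict.getD (PySem.Dict.mk kv.2) "measures" [] ∨
        y ∈ PySem.Dict.getD (PySem.Dict.mk kv.2) "dimensions" [] := by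
  induction d generalizing s with
  | nil => simp
  | cons kv d ih =>
    simp only [List.foldl_cons, ih, PySem.Set.mem_update, List.mem_cons]
    constructor
    · rintro (((h | h) | h) | ⟨kv', h1, h2⟩)
      · exact Or.inl h
      · exact Or.inr ⟨kv, Or.inl rfl, Or.inl h⟩
      · exact Or.inr ⟨kv, Or.inl rfl, Or.inr h⟩
      · exact Or.inr ⟨kv', Or.inr h1, h2⟩
    · rintro (h | ⟨kv', (rfl | h1), h2⟩)
      · exact Or.inl (Or.inl (Or.inl h))
      · rcases h2 with h2 | h2
        · exact Or.inl (Or.inl (Or.inr h2))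
        · exact Or.inl (Or.inr h2)
      · exact Or.inr ⟨kv', h1, h2⟩

-- an infix is a prefix of some drop at an in-range position
lemma infix_iff_exists_drop_le (sub s : List Char) :
    sub <:+: s ↔ ∃ i ≤ s.length, sub <+: s.drop i := by
  constructor
  · intro h
    rw [← PySem.Chars.isIn_iff_infix, ← PySem.Chars.exists_prefix_drop_iff_isIn] at h
    obtain ⟨j, hj⟩ := h
    by_cases hle : j ≤ s.length
    · exact ⟨j, hle, hj⟩
    · have hnil : s.drop j = [] := List.drop_eq_nil_of_le (by omega)
      rw [hnil] at hj
      have : sub = [] := List.prefix_nil.mp hj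
      exact ⟨s.length, le_refl _, by simp [this]⟩
  · rintro ⟨i, _, hi⟩
    rw [← PySem.Chars.isIn_iff_infix, ← PySem.Chars.exists_prefix_drop_iff_isIn]
    exact ⟨i, hi⟩

lemma trieMatch_nil (s : List Char) : trieMatch .nil s = false := by
  cases s <;> simp [trieMatch, trieHasStop, trieFind]

lemma trieMatch_of_hasStop (tr : PTrie) (s : List Char) (h : trieHasStop tr = true) :
    trieMatch tr s = true := by
  cases s <;> simp [trieMatch, h]

lemma hasStop_insert_mark (tr : PTrie) : trieHasStop (trieInsert tr [pvMark]) = true := by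
  induction tr with
  | nil => simp [trieInsert, trieHasStop]
  | node c' ch sib ihc ihs =>
    by_cases h : pvMark = c'
    · simp [trieInsert, h, trieHasStop]
    · simp [trieInsert, h, trieHasStop, ihs]

lemma hasStop_insert_cons (tr : PTrie) (c : Char) (cs : List Char) (hc : c ≠ pvMark) :
    trieHasStop (trieInsert tr (c :: cs)) = trieHasStop tr := by
  induction tr with
  | nil => simp [trieInsert, trieHasStop, hc]
  | node c' ch sib ihc ihs =>
    by_cases h : c = c'
    · simp [trieInsert, h, trieHasStop]
    · simp [trieInsert, h, trieHasStop, ihs]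

lemma find_insert_self (tr : PTrie) (c : Char) (cs : List Char) :
    trieFind (trieInsert tr (c :: cs)) c =
      some (trieInsert ((trieFind tr c).getD .nil) cs) := by
  induction tr with
  | nil => simp [trieInsert, trieFind]
  | node c' ch sib ihc ihs =>
    by_cases h : c = c'
    · simp [trieInsert, h, trieFind]
    · simp [trieInsert, h, trieFind, ihs]

lemma find_insert_other (tr : PTrie) (c x : Char) (cs : List Char) (hx : x ≠ c) :
    trieFind (trieInsert tr (c :: cs)) x = trieFind tr x := by
  induction tr with
  | nil => simp [trieInsert, trieFind, hx]
  | node c' ch sib ihc ihs =>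
    by_cases h : c = c'
    · subst h; simp [trieInsert, trieFind, hx]
    · by_cases h2 : x = c'
      · simp [trieInsert, h, trieFind, h2]
      · simp [trieInsert, h, trieFind, h2, ihs]

-- inserting t ++ [mark] adds exactly the prefix-matches of t
lemma trieMatch_insert (t : List Char) (tr : PTrie) (s : List Char) (ht : pvMark ∉ t) :
    trieMatch (trieInsert tr (t ++ [pvMark])) s = true ↔
      t <+: s ∨ trieMatch tr s = true := by
  induction t generalizing tr s with
  | nil =>
    simp only [List.nil_append, List.nil_prefix, true_or, iff_true]
    exact trieMatch_of_hasStop _ _ (hasStop_insert_mark tr)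
  | cons c t' ih =>
    have hc : c ≠ pvMark := fun h => ht (h ▸ List.mem_cons_self)
    have ht' : pvMark ∉ t' := fun h => ht (List.mem_cons_of_mem _ h)
    cases s with
    | nil =>
      simp only [List.cons_append, trieMatch, hasStop_insert_cons tr c _ hc,
        List.prefix_nil, reduceCtorEq, false_or]
    | cons x rest =>
      by_cases hx : x = c
      · subst hx
        simp only [List.cons_append, trieMatch, hasStop_insert_cons tr x _ hc,
          find_insert_self, List.cons_prefix_cons, true_and]
        cases hfind : trieFind tr x with
        | none =>
          simp only [Option.getD_none, ih _ _ ht', trieMatch_nil,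
            Bool.or_eq_true, Bool.false_eq_true, or_false]
          tauto
        | some chld =>
          simp only [Option.getD_some, ih _ _ ht', Bool.or_eq_true]
          tauto
      · simp only [List.cons_append, trieMatch, hasStop_insert_cons tr c _ hc,
          find_insert_other tr c x _ hx, List.cons_prefix_cons]
        tauto

-- folding the insertions over a term list
lemma trieMatch_foldl (f : String → List Char) (ts : List String) (tr : PTrie) (s : List Char)
    (hts : ∀ t ∈ ts, pvMark ∉ f t) :
    trieMatch (ts.foldl (fun tr t => trieInsert tr (f t ++ [pvMark])) tr) s = true ↔
      (∃ t ∈ ts, f t <+: s) ∨ trieMatch tr s = true := by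
  induction ts generalizing tr with
  | nil => simp
  | cons t ts ih =>
    simp only [List.foldl_cons, ih _ (fun u hu => hts u (List.mem_cons_of_mem _ hu)),
      trieMatch_insert _ _ _ (hts t List.mem_cons_self), List.mem_cons]
    constructor
    · rintro (⟨u, hu, hp⟩ | hp | hp)
      · exact Or.inl ⟨u, Or.inr hu, hp⟩
      · exact Or.inl ⟨t, Or.inl rfl, hp⟩
      · exact Or.inr hp
    · rintro (⟨u, (rfl | hu), hp⟩ | hp)
      · exact Or.inr (Or.inl hp)
      · exact Or.inl ⟨u, hu, hp⟩
      · exact Or.inr (Or.inr hp)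

lemma trieScan_iff (tr : PTrie) (s : List Char) :
    trieScan tr s = true ↔ ∃ i ≤ s.length, trieMatch tr (s.drop i) = true := by
  induction s with
  | nil =>
    simp only [trieScan, List.length_nil]
    constructor
    · intro h; exact ⟨0, Nat.le_refl _, h⟩
    · rintro ⟨i, hi, h⟩
      have : i = 0 := Nat.le_zero.mp hi
      simpa [this] using h
  | cons c rest ih =>
    simp only [trieScan, Bool.or_eq_true, ih, List.length_cons]
    constructor
    · rintro (h | ⟨i, hi, h⟩)
      · exact ⟨0, Nat.zero_le _, h⟩
      · exact ⟨i + 1, by omega, by simpa using h⟩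
    · rintro ⟨i, hi, h⟩
      cases i with
      | zero => exact Or.inl (by simpa using h)
      | succ j => exact Or.inr ⟨j, by omega, by simpa using h⟩

lemma lowerChar_ne_mark (c : Char) (h : pvDomChar c = true) :
    PySem.Chars.lowerChar c ≠ pvMark := by
  intro heq
  have hb : 9 ≤ c.toNat ∧ c.toNat ≤ 126 := by
    simp only [pvDomChar, Bool.or_eq_true, Bool.and_eq_true, decide_eq_true_eq, beq_iff_eq] at h
    omega
  have : (PySem.Chars.lowerChar c).toNat = 0 := by rw [heq]; rfl
  simp only [PySem.Chars.lowerChar] at this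
  split_ifs at this with hu
  · rw [Char.toNat_ofNat, if_pos (Or.inl (by omega : c.toNat + 32 < 55296))] at this
    omega
  · omega

lemma mark_not_mem_lower (t : String) (h : pvDomStr t = true) :
    pvMark ∉ PySem.Chars.lower t.toList := by
  intro hmem
  simp only [PySem.Chars.lower, List.mem_map] at hmem
  obtain ⟨c, hc, heq⟩ := hmem
  simp only [pvDomStr, List.all_eq_true] at h
  exact lowerChar_ne_mark c (h c hc) heq

-- any element of getD (mk l) k [] comes from one of l's value lists
lemma mem_getD_mk (l : List (String × List String)) (k : String) (x : String)
    (hx : x ∈ PySem.Dict.getD (PySem.Dict.mk l) k []) : ∃ p ∈ l, x ∈ p.2 := by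
  simp only [PySem.Dict.getD, PySem.Dict.get?] at hx
  cases hfind : List.find? (fun p => p.1 == k) l with
  | none => simp [hfind] at hx
  | some p =>
    refine ⟨p, List.mem_of_find?_eq_some hfind, ?_⟩
    simpa [hfind] using hx

-- ===== VERDICT (by name: the statement is the Claim_ definition above) =====
theorem has_clear_terms_py_spec : Claim_equal_has_clear_terms_py := by
  intro query cube_schema hdom
  unfold Spec_has_clear_terms_py
  rcases cube_schema with _ | d
  · rfl
  · by_cases hd : d.isEmpty
    · simp [has_clear_terms_py, has_clear_terms_py_alt, hd]
    · -- every term string occurring in the schema is a Dom string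
      have hdomterm : ∀ kv ∈ d, ∀ key t, t ∈ PySem.Dict.getD (PySem.Dict.mk kv.2) key [] →
          pvDomStr t = true := by
        intro kv hkv key t ht
        obtain ⟨p, hp, htp⟩ := mem_getD_mk _ _ _ ht
        simp only [Dom_has_clear_terms_py, Option.map_some, Option.getD_some,
          Bool.and_eq_true, List.all_eq_true] at hdom
        have := (hdom.2 kv hkv).2 p hp
        exact (this.2 t htp)
      simp only [has_clear_terms_py, has_clear_terms_py_alt, hd, Bool.false_eq_true, if_false]
      rw [Bool.eq_iff_iff]
      have hmarks : ∀ t ∈ ((d.map (·.2)).flatMap (fun cube_def =>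
          ["measures", "dimensions"].flatMap
            (fun key => PySem.Dict.getD (PySem.Dict.mk cube_def) key []))),
          pvMark ∉ PySem.Chars.lower t.toList := by
        intro t ht
        simp only [List.mem_flatMap, List.mem_map, List.mem_cons, List.not_mem_nil,
          or_false] at ht
        obtain ⟨cd, ⟨kv, hkv, hcd⟩, key, hkey, htk⟩ := ht
        subst hcd
        exact mark_not_mem_lower t (hdomterm kv hkv key t htk)
      rw [trieScan_iff, List.any_eq_true]
      constructor
      · rintro ⟨t, hmem, hin⟩
        rw [mem_termfold] at hmem
        rcases hmem with hmem | ⟨kv, hkv, hm⟩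
        · simp [PySem.Set.empty] at hmem
        · rw [PySem.Str.isIn_iff_infix] at hin
          simp only [PySem.Str.toList_lower] at hin
          rw [infix_iff_exists_drop_le] at hin
          obtain ⟨i, hile, hpre⟩ := hin
          refine ⟨i, by simpa using hile, ?_⟩
          rw [trieMatch_foldl _ _ _ _ hmarks]
          refine Or.inl ⟨t, ?_, hpre⟩
          simp only [List.mem_flatMap, List.mem_map, List.mem_cons, List.not_mem_nil, or_false]
          rcases hm with hm | hm
          · exact ⟨kv.2, ⟨kv, hkv, rfl⟩, "measures", Or.inl rfl, hm⟩
          · exact ⟨kv.2, ⟨kv, hkv, rfl⟩, "dimensions", Or.inr rfl, hm⟩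
      · rintro ⟨i, hile, hmatch⟩
        rw [trieMatch_foldl _ _ _ _ hmarks] at hmatch
        rcases hmatch with ⟨t, hmem, hpre⟩ | habs
        · simp only [List.mem_flatMap, List.mem_map, List.mem_cons, List.not_mem_nil,
            or_false] at hmem
          obtain ⟨cd, ⟨kv, hkv, hcd⟩, key, hkey, htk⟩ := hmem
          subst hcd
          refine ⟨t, ?_, ?_⟩
          · rw [mem_termfold]
            refine Or.inr ⟨kv, hkv, ?_⟩
            rcases hkey with rfl | rfl
            · exact Or.inl htk
            · exact Or.inr htk
          · rw [PySem.Str.isIn_iff_infix]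
            simp only [PySem.Str.toList_lower]
            rw [infix_iff_exists_drop_le]
            exact ⟨i, by simpa using hile, hpre⟩
        · rw [trieMatch_nil] at habs
          exact absurd habs (by simp)
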